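-- pv_equiv track=rewrite | github.com/wangchaoziyang/AutoConfig | ui/config_table.py | _handle_normal_component
-- ===== SOURCE A (Python) =====
-- def _handle_normal_component(text, max_length):
--     """处理普通组件的文本"""
--     delimiters = [',', ';', '/', '-', '+', '(', ')', '[', ']']
--     positions = []
--
--     for delimiter in delimiters:
--         positions.extend([pos for pos, char in enumerate(text) if char == delimiter])
--
--     positions.sort()
--
--     suitable_position = -1
--     for pos in positions:
--         if pos < max_length - 3:
--             suitable_position = pos
--         else:
--             break
--
--     if suitable_position > max_length // 2:
--         return text[:suitable_position + 1] + "..."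
--
--     return text[:max_length - 3] + "..."
-- ===== SOURCE B (Python) =====
-- def _handle_normal_component(text, max_length):
--     """处理普通组件的文本"""
--     delimiters = {',', ';', '/', '-', '+', '(', ')', '[', ']'}
--     limit = max_length - 3
--
--     suitable_position = -1
--     for i in range(min(len(text), limit) - 1, -1, -1):
--         if text[i] in delimiters:
--             suitable_position = i
--             break
--
--     if suitable_position > max_length // 2:
--         return text[:suitable_position + 1] + "..."
--
--     return text[:max_length - 3] + "..."
-- ===== Notes on version B (the rewrite author's own statement) =====
-- stated objective: faster
-- what changed: Instead of collecting every delimiter position into a list, sorting it, and scanning forward with break, B does a single right-to-left scan over the prefix below the limit and stops at the first delimiter it meets.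
import Mathlib
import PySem

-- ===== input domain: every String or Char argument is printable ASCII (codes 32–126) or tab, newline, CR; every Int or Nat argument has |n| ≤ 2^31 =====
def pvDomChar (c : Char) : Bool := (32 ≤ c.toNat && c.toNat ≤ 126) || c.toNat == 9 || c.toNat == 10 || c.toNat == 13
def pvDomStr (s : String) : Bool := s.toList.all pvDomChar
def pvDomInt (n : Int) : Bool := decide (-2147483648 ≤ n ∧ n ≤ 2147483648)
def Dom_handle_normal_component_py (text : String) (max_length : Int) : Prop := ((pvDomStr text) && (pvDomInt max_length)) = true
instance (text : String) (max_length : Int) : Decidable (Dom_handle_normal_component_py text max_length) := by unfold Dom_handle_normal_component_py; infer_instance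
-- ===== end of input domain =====

-- B replaces A's collect-all-positions / sort / forward-scan by a single right-to-left scan
-- over the prefix below the limit, stopping at the first delimiter (objective: faster).

-- ===== PORT A =====
def hnDelims : List Char := [',', ';', '/', '-', '+', '(', ')', '[', ']']

-- 'for pos in positions: if pos < L: suitable = pos else: break'
def hnALoop (L : Int) : List Int → Int → Int
  | [], s => s
  | p :: ps, s => if p < L then hnALoop L ps p else s

def handle_normal_component_py (text : String) (max_length : Int) : String :=
  let cs := text.toList
  let positions := hnDelims.foldl
    (fun acc d => acc ++ ((PySem.List.enumerate cs).filter (fun pc => pc.2 == d)).map (·.1)) []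
  let sortedPositions := PySem.List.sorted positions (fun x => x)
  let suitable := hnALoop (max_length - 3) sortedPositions (-1)
  if suitable > PySem.Int.floordiv max_length 2 then
    String.ofList (PySem.List.slice cs none (some (suitable + 1)) ++ "...".toList)
  else
    String.ofList (PySem.List.slice cs none (some (max_length - 3)) ++ "...".toList)

-- ===== PORT B =====
def hnDelimSet : PySem.Set Char := PySem.Set.ofList [',', ';', '/', '-', '+', '(', ')', '[', ']']

-- 'for i in range(start, -1, -1): if text[i] in delims: suitable = i; break' ported as the
-- obvious downward recursion from start + 1 = min(len(text), limit) (clamped to 0 when the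
-- range is empty); text[i] is exact as pyGetD since 0 ≤ i < len(text) on this range.
def hnBLoop (cs : List Char) : Nat → Int
  | 0 => -1
  | m + 1 => if PySem.Set.contains hnDelimSet (PySem.List.pyGetD cs (m : Int) ' ')
             then (m : Int) else hnBLoop cs m

def handle_normal_component_py_alt (text : String) (max_length : Int) : String :=
  let cs := text.toList
  let limit := max_length - 3
  let suitable := hnBLoop cs (min (PySem.List.len cs) limit).toNat
  if suitable > PySem.Int.floordiv max_length 2 then
    String.ofList (PySem.List.slice cs none (some (suitable + 1)) ++ "...".toList)
  else
    String.ofList (PySem.List.slice cs none (some limit) ++ "...".toList)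

-- ===== PRECONDITION & SPEC =====
def Spec_handle_normal_component_py (text : String) (max_length : Int) (out : String) : Prop := out = handle_normal_component_py_alt text max_length
instance (text : String) (max_length : Int) (out : String) : Decidable (Spec_handle_normal_component_py text max_length out) := by unfold Spec_handle_normal_component_py; infer_instance

-- ===== CLAIM (what is proved, stated in full; the proofs are below) =====
def Claim_equal_handle_normal_component_py : Prop := ∀ (text : String) (max_length : Int), Dom_handle_normal_component_py text max_length → Spec_handle_normal_component_py text max_length (handle_normal_component_py text max_length)

-- ===== LEMMAS AND PROOFS =====

-- membership predicate shared by the two characterisations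
def hnQ (c : Char) : Bool := decide (c ∈ hnDelims)

-- the delimiter indices of cs below k, in increasing order, as Ints
def hnIdx (cs : List Char) (k : Nat) : List Int :=
  ((List.range k).filter (fun i : Nat => hnQ (PySem.List.pyGetD cs (i : Int) ' '))).map
    (fun i : Nat => (i : Int))

lemma hnSet_contains (c : Char) : PySem.Set.contains hnDelimSet c = hnQ c := by
  simp only [hnQ, hnDelimSet, hnDelims]
  rw [show PySem.Set.ofList [',', ';', '/', '-', '+', '(', ')', '[', ']']
      = [',', ';', '/', '-', '+', '(', ')', '[', ']'] from by decide]
  exact PySem.Set.contains_eq_decide _ c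

-- A's scan loop computes getLastD of the takeWhile prefix
lemma hnALoop_eq (L : Int) : ∀ (ps : List Int) (s : Int),
    hnALoop L ps s = (ps.takeWhile (fun p => decide (p < L))).getLastD s := by
  intro ps
  induction ps with
  | nil => intro s; simp [hnALoop]
  | cons p ps ih =>
    intro s
    rw [List.takeWhile_cons]
    by_cases h : p < L
    · rw [hnALoop, if_pos h, decide_eq_true h, if_pos rfl, List.getLastD_cons, ih p]
    · rw [hnALoop, if_neg h, decide_eq_false h]
      simp

-- merging one delimiter's occurrences into the rest is a permutation of the combined filter
lemma hnPerm_step (d : Char) (ds : List Char) (hd : d ∉ ds) (el : List (Int × Char)) :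
    (el.filter (fun pc => pc.2 == d) ++ el.filter (fun pc => decide (pc.2 ∈ ds))).Perm
      (el.filter (fun pc => decide (pc.2 ∈ d :: ds))) := by
  induction el with
  | nil => simp
  | cons x el ih =>
    rw [List.filter_cons, List.filter_cons, List.filter_cons]
    by_cases h1 : x.2 = d
    · have h2 : x.2 ∉ ds := h1 ▸ hd
      rw [if_pos (by simp [h1]), if_neg (by simp [h2]), if_pos (by simp [h1])]
      exact ih.cons x
    · by_cases h2 : x.2 ∈ ds
      · rw [if_neg (by simp [h1]), if_pos (by simp [h2]), if_pos (by simp [h2])]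
        exact (List.perm_middle).trans (ih.cons x)
      · rw [if_neg (by simp [h1]), if_neg (by simp [h2]), if_neg (by simp [h1, h2])]
        exact ih

lemma hnPerm (el : List (Int × Char)) : ∀ (ds : List Char), ds.Nodup →
    (ds.flatMap (fun d => el.filter (fun pc => pc.2 == d))).Perm
      (el.filter (fun pc => decide (pc.2 ∈ ds))) := by
  intro ds
  induction ds with
  | nil => simp
  | cons d ds ih =>
    intro hnd
    rcases List.nodup_cons.mp hnd with ⟨hd, hnd'⟩
    rw [List.flatMap_cons]
    exact ((ih hnd').append_left _).trans (hnPerm_step d ds hd el)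

-- the filtered index projection of enumerate is hnIdx over the full length
lemma hnTarget_eq (cs : List Char) :
    (((PySem.List.enumerate cs).filter (fun pc => decide (pc.2 ∈ hnDelims))).map (·.1))
      = hnIdx cs cs.length := by
  rw [PySem.List.enumerate_eq_map_pyRange cs ' ',
    show PySem.List.len cs = ((cs.length : Nat) : Int) from by simp [PySem.List.len],
    PySem.List.pyRange_zero_natCast, List.map_map, List.filter_map, List.map_map, hnIdx]
  rfl

lemma hnIdx_pairwise_aux (cs : List Char) (k : Nat) : (hnIdx cs k).Pairwise (· < ·) := by
  rw [hnIdx]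
  refine List.Pairwise.map _ (fun a b h => ?_) ((List.pairwise_lt_range).filter _)
  exact_mod_cast h

-- the sorted position list of A equals hnIdx over the full length
lemma hnSorted_eq (cs : List Char) :
    PySem.List.sorted (hnDelims.foldl
      (fun acc d => acc ++ ((PySem.List.enumerate cs).filter (fun pc => pc.2 == d)).map (·.1)) [])
      (fun x => x) = hnIdx cs cs.length := by
  rw [PySem.List.foldl_append_eq_flatMap, List.nil_append]
  apply PySem.List.sorted_eq_of_perm_of_pairwise_lt
  · have hp := ((hnPerm (PySem.List.enumerate cs) hnDelims (by decide)).map (fun x => x.1)).symm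
    rw [List.map_flatMap, hnTarget_eq] at hp
    exact hp
  · exact hnIdx_pairwise_aux cs cs.length

-- B's downward scan computes getLastD of hnIdx
lemma hnBLoop_eq (cs : List Char) : ∀ (m : Nat), hnBLoop cs m = (hnIdx cs m).getLastD (-1) := by
  intro m
  induction m with
  | zero => simp [hnBLoop, hnIdx]
  | succ m ih =>
    rw [hnIdx, List.range_succ, List.filter_append, List.map_append, List.filter_singleton,
      hnBLoop, hnSet_contains]
    by_cases h : hnQ (PySem.List.pyGetD cs (m : Int) ' ') = true
    · rw [if_pos h, h, cond_true, List.map_cons, List.map_nil, List.getLastD_concat]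
    · rw [if_neg h]
      rw [Bool.not_eq_true] at h
      rw [h, cond_false, List.map_nil, List.append_nil, ih, hnIdx]

-- on a strictly increasing list, takeWhile (< L) is filter (< L)
lemma hnTakeWhile_filter (L : Int) : ∀ (l : List Int), l.Pairwise (· < ·) →
    l.takeWhile (fun p => decide (p < L)) = l.filter (fun p => decide (p < L)) := by
  intro l
  induction l with
  | nil => simp
  | cons a t ih =>
    intro hp
    rcases List.pairwise_cons.mp hp with ⟨ha, ht⟩
    rw [List.takeWhile_cons, List.filter_cons]
    by_cases h : a < L
    · rw [decide_eq_true h, if_pos rfl, if_pos rfl, ih ht]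
    · rw [decide_eq_false h]
      simp only [Bool.false_eq_true, if_false]
      symm
      rw [List.filter_eq_nil_iff]
      intro b hb
      simp only [decide_eq_true_eq]
      have := ha b hb
      omega

lemma hnIdx_pairwise (cs : List Char) (k : Nat) : (hnIdx cs k).Pairwise (· < ·) :=
  hnIdx_pairwise_aux cs k

-- filtering hnIdx cs n below m (m ≤ n) gives hnIdx cs m
lemma hnIdx_filter (cs : List Char) (m b : Nat) :
    (hnIdx cs (m + b)).filter (fun p => decide (p < (m : Int))) = hnIdx cs m := by
  unfold hnIdx
  rw [List.range_add, List.filter_append, List.map_append, List.filter_append]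
  have h1 : (((List.range m).filter (fun i : Nat => hnQ (PySem.List.pyGetD cs (i : Int) ' '))).map
      (fun i : Nat => (i : Int))).filter (fun p => decide (p < (m : Int)))
      = ((List.range m).filter (fun i : Nat => hnQ (PySem.List.pyGetD cs (i : Int) ' '))).map
      (fun i : Nat => (i : Int)) := by
    rw [List.filter_eq_self]
    intro a ha
    rcases List.mem_map.mp ha with ⟨i, hi, rfl⟩
    have := List.mem_range.mp (List.mem_filter.mp hi).1
    simp only [decide_eq_true_eq]
    exact_mod_cast this
  have h2 : (((((List.range b).map (fun x => m + x))).filter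
      (fun i : Nat => hnQ (PySem.List.pyGetD cs (i : Int) ' '))).map (fun i : Nat => (i : Int))).filter
      (fun p => decide (p < (m : Int))) = [] := by
    rw [List.filter_eq_nil_iff]
    intro a ha
    rcases List.mem_map.mp ha with ⟨i, hi, rfl⟩
    rcases List.mem_map.mp (List.mem_filter.mp hi).1 with ⟨x, _, rfl⟩
    simp only [decide_eq_true_eq, not_lt]
    exact_mod_cast Nat.le_add_right m x
  rw [h1, h2, List.append_nil]

-- elements of hnIdx cs n are < n, so the cut at L agrees with the cut at (min n L).toNat
lemma hnIdx_filter_bound (cs : List Char) (L : Int) :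
    (hnIdx cs cs.length).filter (fun p => decide (p < L))
      = (hnIdx cs cs.length).filter
          (fun p => decide (p < (((min ((cs.length : Int)) L).toNat : Nat) : Int))) := by
  apply List.filter_congr
  intro x hx
  unfold hnIdx at hx
  rcases List.mem_map.mp hx with ⟨i, hi, rfl⟩
  have hin : i < cs.length := List.mem_range.mp (List.mem_filter.mp hi).1
  have h2 : (i : Int) < (cs.length : Int) := by exact_mod_cast hin
  simp only [decide_eq_decide]
  omega

-- the two scans agree
lemma hnSuitable_eq (cs : List Char) (L : Int) :
    hnALoop L (PySem.List.sorted (hnDelims.foldl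
      (fun acc d => acc ++ ((PySem.List.enumerate cs).filter (fun pc => pc.2 == d)).map (·.1)) [])
      (fun x => x)) (-1)
      = hnBLoop cs (min (PySem.List.len cs) L).toNat := by
  have hlen : PySem.List.len cs = (cs.length : Int) := by simp [PySem.List.len]
  set m : Nat := (min (PySem.List.len cs) L).toNat with hm
  have hmn : m ≤ cs.length := by omega
  obtain ⟨b, hb⟩ := Nat.exists_eq_add_of_le hmn
  rw [hnSorted_eq, hnALoop_eq, hnTakeWhile_filter L _ (hnIdx_pairwise cs cs.length),
    hnIdx_filter_bound, hnBLoop_eq]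
  rw [show (min ((cs.length : Int)) L).toNat = m from by omega, hb, hnIdx_filter]

-- ===== VERDICT (by name: the statement is the Claim_ definition above) =====
theorem handle_normal_component_py_spec : Claim_equal_handle_normal_component_py := by
  intro text max_length _
  have h := hnSuitable_eq text.toList (max_length - 3)
  simp only [Spec_handle_normal_component_py, handle_normal_component_py,
    handle_normal_component_py_alt, h]
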